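-- pv_equiv track=rewrite | github.com/jpordoy/Ictal-Phase-Detection | heart_rate_length_experiments.py | correct_glitched_hr
-- ===== SOURCE A (Python) =====
-- def correct_glitched_hr(array):
--     corrected_values = []
--     for i, hr in enumerate(array):
--         if hr == -1:
--             # Find the next non-glitched heart rate value within the same timestep
--             next_valid_hr_index = i + 1
--             next_valid_hr = next((hr for hr in array[next_valid_hr_index:] if hr != -1), None)
--             if next_valid_hr is not None:
--                 # Generate artificial data based on the next valid heart rate value
--                 corrected_values.append(next_valid_hr)
--             else:
--                 # If there are no more valid heart rate values, set it to 0
--                 corrected_values.append(0)  # Or any default value as needed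
--         else:
--             corrected_values.append(hr)
--     return corrected_values
-- ===== SOURCE B (Python) =====
-- def correct_glitched_hr(array):
--     # Single backward pass: track the nearest valid value to the right (default 0).
--     out = []
--     nxt = 0
--     for hr in reversed(array):
--         if hr == -1:
--             out.append(nxt)
--         else:
--             nxt = hr
--             out.append(hr)
--     out.reverse()
--     return out
-- ===== Notes on version B (the rewrite author's own statement) =====
-- stated objective: alternative
-- what changed: A rescans the tail of the array for the next valid value at every -1 entry; B makes a single backward pass carrying the nearest valid value to the right (default 0).
import Mathlib
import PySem

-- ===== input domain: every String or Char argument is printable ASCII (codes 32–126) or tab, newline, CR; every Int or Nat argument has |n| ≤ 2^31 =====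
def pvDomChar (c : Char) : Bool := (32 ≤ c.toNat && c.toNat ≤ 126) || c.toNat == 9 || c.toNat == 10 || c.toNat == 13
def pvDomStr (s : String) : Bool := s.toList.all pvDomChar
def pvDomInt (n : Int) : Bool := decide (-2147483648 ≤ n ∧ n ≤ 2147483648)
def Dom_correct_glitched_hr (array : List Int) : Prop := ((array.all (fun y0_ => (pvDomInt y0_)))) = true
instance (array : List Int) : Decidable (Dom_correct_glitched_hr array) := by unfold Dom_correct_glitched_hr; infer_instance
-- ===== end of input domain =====

-- B replaces A's per-glitch forward rescan by a single backward pass carrying the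
-- nearest valid value to the right (default 0): a different, one-pass algorithm.


-- ===== PORT A =====
-- next((hr for hr in l if hr != -1), None): first element ≠ -1
def pvFirstValid : List Int → Option Int
  | [] => none
  | h :: t => if h ≠ -1 then some h else pvFirstValid t

def correct_glitched_hr (array : List Int) : List Int :=
  (PySem.List.enumerate array).foldl (fun corrected_values p =>
    let i := p.1
    let hr := p.2
    if hr = -1 then
      let next_valid_hr_index := i + 1
      -- array[next_valid_hr_index:] with i ≥ 0, so the slice is exact
      let next_valid_hr := pvFirstValid (PySem.List.slice array (some next_valid_hr_index) none)
      match next_valid_hr with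
      | some v => corrected_values ++ [v]
      | none => corrected_values ++ [0]
    else corrected_values ++ [hr]) []

-- ===== PORT B =====
-- backward pass: returns (corrected suffix, nearest valid value in the suffix, default 0)
def pvBack : List Int → List Int × Int
  | [] => ([], 0)
  | h :: t =>
    let (rest, nxt) := pvBack t
    if h = -1 then (nxt :: rest, nxt) else (h :: rest, h)

def correct_glitched_hr_alt (array : List Int) : List Int := (pvBack array).1

-- ===== PRECONDITION & SPEC =====
def Spec_correct_glitched_hr (array : List Int) (out : List Int) : Prop := out = correct_glitched_hr_alt array
instance (array : List Int) (out : List Int) : Decidable (Spec_correct_glitched_hr array out) := by unfold Spec_correct_glitched_hr; infer_instance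

-- ===== CLAIM (what is proved, stated in full; the proofs are below) =====
def Claim_equal_correct_glitched_hr : Prop := ∀ (array : List Int), Dom_correct_glitched_hr array → Spec_correct_glitched_hr array (correct_glitched_hr array)

-- ===== LEMMAS AND PROOFS =====

-- the carried "nearest valid value" of B is A's next(...) with default 0
theorem pvBack_snd (l : List Int) : (pvBack l).2 = (pvFirstValid l).getD 0 := by
  induction l with
  | nil => rfl
  | cons h t ih =>
    simp only [pvBack, pvFirstValid]
    by_cases hh : h = -1 <;> simp [hh, ih]

-- generalized loop invariant for A's fold over the enumerated suffix
theorem loopA (array : List Int) :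
    ∀ (t : List Int) (k : Nat) (acc : List Int), array.drop k = t →
    (PySem.List.enumerate t (k : Int)).foldl (fun corrected_values p =>
      let i := p.1
      let hr := p.2
      if hr = -1 then
        let next_valid_hr := pvFirstValid (PySem.List.slice array (some (i + 1)) none)
        match next_valid_hr with
        | some v => corrected_values ++ [v]
        | none => corrected_values ++ [0]
      else corrected_values ++ [hr]) acc = acc ++ (pvBack t).1 := by
  intro t
  induction t with
  | nil => intro k acc _; simp [PySem.List.enumerate_nil, pvBack]
  | cons h rest ih =>
    intro k acc hdrop
    have hdrop' : array.drop (k + 1) = rest := by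
      have := congrArg List.tail hdrop
      simpa [List.tail_drop] using this
    have hslice : PySem.List.slice array (some ((k : Int) + 1)) none = rest := by
      have hcast : ((k : Int) + 1) = ((k + 1 : Nat) : Int) := by push_cast; ring
      rw [hcast, PySem.List.slice_from_natCast, hdrop']
    rw [PySem.List.enumerate_cons, List.foldl_cons]
    have hcast : ((k : Int) + 1) = ((k + 1 : Nat) : Int) := by push_cast; ring
    rw [hcast, ih (k + 1) _ hdrop']
    by_cases hh : h = -1
    · simp only [hh, hslice, if_pos, pvBack, pvBack_snd]
      cases hfv : pvFirstValid rest <;> simp [List.append_assoc]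
    · simp [hh, pvBack]

-- ===== VERDICT (by name: the statement is the Claim_ definition above) =====
theorem correct_glitched_hr_spec : Claim_equal_correct_glitched_hr := by
  intro array _
  unfold Spec_correct_glitched_hr correct_glitched_hr correct_glitched_hr_alt
  simpa using loopA array array 0 [] (by simp)
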